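-- pv_equiv track=rewrite | github.com/coding-samu/Algo2 | graphsMethods.py | DFSList
-- ===== SOURCE A (Python) =====
-- def DFSList(u, G):
--     """
--     Performs a Depth-First Search (DFS) starting from a given vertex in a graph.
--
--     Parameters:
--     u (int): The starting vertex for the DFS.
--     G (list): The adjacency list representation of the graph.
--
--     Returns:
--     list: A list indicating which vertices have been visited during the DFS.
--     """
--     def DFSr(u, G, visitati):
--         visitati[u] = True
--         for i in G[u]:
--             if not visitati[i]:
--                 DFSr(i, G, visitati)
--     visitati = [False] * len(G)
--     DFSr(u, G, visitati)
--     return visitati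
-- ===== SOURCE B (Python) =====
-- def DFSList(u, G):
--     """
--     Performs a Depth-First Search (DFS) starting from a given vertex in a graph.
--
--     Iterative re-implementation: explicit stack instead of recursion.
--     """
--     visitati = [False] * len(G)
--     stack = [u]
--     while stack:
--         v = stack.pop()
--         if not visitati[v]:
--             visitati[v] = True
--             for w in G[v]:
--                 if not visitati[w]:
--                     stack.append(w)
--     return visitati
-- ===== Notes on version B (the rewrite author's own statement) =====
-- stated objective: alternative
-- what changed: The recursive helper DFSr with in-place marking is replaced by an iterative DFS with an explicit stack worklist (pop a vertex, mark it, push its unvisited neighbours); the visited array is identical because it records reachability regardless of visitation order.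
import Mathlib
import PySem

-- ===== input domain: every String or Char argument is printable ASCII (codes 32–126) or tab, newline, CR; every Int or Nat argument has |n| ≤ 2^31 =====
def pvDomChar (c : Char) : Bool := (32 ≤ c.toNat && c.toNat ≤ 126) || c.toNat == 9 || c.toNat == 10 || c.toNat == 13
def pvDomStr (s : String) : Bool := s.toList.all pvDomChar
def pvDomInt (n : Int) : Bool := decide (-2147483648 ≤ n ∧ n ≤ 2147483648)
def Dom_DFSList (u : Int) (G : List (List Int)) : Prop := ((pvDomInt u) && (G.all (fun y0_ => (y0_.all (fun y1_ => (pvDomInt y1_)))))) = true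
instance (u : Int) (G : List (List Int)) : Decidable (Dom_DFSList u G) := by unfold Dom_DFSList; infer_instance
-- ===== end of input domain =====

-- B replaces A's recursive DFS helper by an iterative DFS with an explicit stack
-- (alternative decomposition, same O(V+E) cost); return values agree on Pre_.

-- Python list indexing `xs[i]` normalises a negative index by adding len(xs);
-- `pvNrm` is exact for indices in [-len, len) (elsewhere Python raises, outside Pre_).
def pvNrm (n : Nat) (i : Int) : Nat := if i < 0 then (i + n).toNat else i.toNat

-- ===== PORT A =====
-- A's inner `DFSr`: mark u, then recurse on unvisited neighbours.  The fuel
-- argument only makes the recursion structural; it is never exhausted on Pre_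
-- (proved in dfsrA_spec: `count false` strictly decreases at each call).
def DFSList_dfsr (G : List (List Int)) (fuel : Nat) (u : Nat) (vis : List Bool) : List Bool :=
  match fuel with
  | 0 => vis
  | fuel + 1 =>
    if u < vis.length then
      -- visitati[u] = True; for i in G[u]: if not visitati[i]: DFSr(i, G, visitati)
      (G.getD u []).foldl
        (fun v i =>
          if v.getD (pvNrm G.length i) false then v
          else DFSList_dfsr G fuel (pvNrm G.length i) v)
        (vis.set u true)
    else vis  -- Python raises IndexError here (outside Pre_)

def DFSList (u : Int) (G : List (List Int)) : List Bool :=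
  DFSList_dfsr G G.length (pvNrm G.length u) (List.replicate G.length false)

-- ===== PORT B =====
-- termination helper for the loop: marking an unvisited vertex removes one `false`
theorem pv_cf_set (vis : List Bool) (w : Nat) (h : w < vis.length)
    (hf : vis.getD w false = false) :
    (vis.set w true).count false + 1 = vis.count false := by
  induction vis generalizing w with
  | nil => simp at h
  | cons b t ih =>
    cases w with
    | zero =>
      simp only [List.getD_cons_zero] at hf
      subst hf
      simp
    | succ w' =>
      simp only [List.getD_cons_succ] at hf
      have := ih w' (by simpa using h) hf
      show (b :: t.set w' true).count false + 1 = (b :: t).count false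
      simp only [List.count_cons]
      omega

-- B's loop: pop a vertex; if unvisited, mark it and push its unvisited neighbours.
-- The stack is kept top-first (Python pops/appends at the end of the list).
def DFSList_alt_loop (G : List (List Int)) (stack : List Int) (vis : List Bool) : List Bool :=
  match stack with
  | [] => vis
  | v :: rest =>
    if h : pvNrm G.length v < vis.length then
      if hv : vis.getD (pvNrm G.length v) false = true then
        DFSList_alt_loop G rest vis
      else
        DFSList_alt_loop G
          ((G.getD (pvNrm G.length v) []).foldl
            (fun s i =>
              if (vis.set (pvNrm G.length v) true).getD (pvNrm G.length i) false then s
              else i :: s)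
            rest)
          (vis.set (pvNrm G.length v) true)
    else vis  -- Python raises IndexError here (outside Pre_)
termination_by (vis.count false, stack.length)
decreasing_by
  · exact Prod.Lex.right _ (Nat.lt_succ_self _)
  · exact Prod.Lex.left _ _ (by
      have := pv_cf_set vis (pvNrm G.length v) h (by simpa using hv)
      omega)

def DFSList_alt (u : Int) (G : List (List Int)) : List Bool :=
  DFSList_alt_loop G [u] (List.replicate G.length false)

-- ===== PRECONDITION & SPEC =====
-- one saturation round of the set of vertices the DFS visits: add every vertex
-- pointed to by an in-range entry of an already-visited vertex (a round-based
-- closure, not a copy of either port's traversal)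
def pvStepF (G : List (List Int)) (S : Finset Nat) : Finset Nat :=
  S ∪ S.biUnion (fun a =>
    (((G.getD a []).filter
        (fun i => decide (-(G.length : Int) ≤ i ∧ i < (G.length : Int)))).map
      (pvNrm G.length)).toFinset)

-- the set of vertices reachable from u through in-range entries (|G| rounds saturate)
def pvVisited (u : Int) (G : List (List Int)) : Finset Nat :=
  (pvStepF G)^[G.length] {pvNrm G.length u}

-- the exact domain of A: Python raises IndexError precisely when the DFS
-- dereferences an index outside [-len(G), len(G)) — i.e. when u is out of range,
-- or some vertex it visits has an out-of-range adjacency entry.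
def Pre_DFSList (u : Int) (G : List (List Int)) : Prop :=
  (-(G.length : Int) ≤ u ∧ u < G.length) ∧
  ∀ a ∈ pvVisited u G, ∀ i ∈ G.getD a [], -(G.length : Int) ≤ i ∧ i < G.length
instance (u : Int) (G : List (List Int)) : Decidable (Pre_DFSList u G) := by
  unfold Pre_DFSList; infer_instance

def pvWitness_DFSList : Int × List (List Int) := (0, [[1], [0], []])

def Spec_DFSList (u : Int) (G : List (List Int)) (out : List Bool) : Prop := out = DFSList_alt u G
instance (u : Int) (G : List (List Int)) (out : List Bool) : Decidable (Spec_DFSList u G out) := by unfold Spec_DFSList; infer_instance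

-- ===== CLAIM (what is proved, stated in full; the proofs are below) =====
def Claim_equal_DFSList : Prop := ∀ (u : Int) (G : List (List Int)), Dom_DFSList u G → Pre_DFSList u G → Spec_DFSList u G (DFSList u G)

-- ===== LEMMAS AND PROOFS =====

-- the edge relation both ports traverse: b is (the normalised index of) an entry of G[a]
def pvEdge (G : List (List Int)) (a b : Nat) : Prop :=
  b ∈ (G.getD a []).map (pvNrm G.length)

def pvReach (G : List (List Int)) (a b : Nat) : Prop :=
  Relation.ReflTransGen (pvEdge G) a b

theorem pv_getD_replicate (n w : Nat) : (List.replicate n false).getD w false = false := by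
  simp only [List.getD_eq_getElem?_getD, List.getElem?_replicate]
  split <;> rfl

theorem pv_getD_set (vis : List Bool) (u w : Nat) (hu : u < vis.length) :
    (vis.set u true).getD w false = if u = w then true else vis.getD w false := by
  simp only [List.getD_eq_getElem?_getD, List.getElem?_set]
  split
  · next h => subst h; simp [hu]
  · rfl

theorem pvNrm_lt (n : Nat) (i : Int) (h1 : -(n : Int) ≤ i) (h2 : i < n) : pvNrm n i < n := by
  unfold pvNrm
  split <;> omega

-- a marked set containing u0 and closed under edges contains everything reachable
theorem pv_closed_complete (G : List (List Int)) (out : List Bool) (u0 : Nat)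
    (hu : out.getD u0 false = true)
    (hcl : ∀ a b, out.getD a false = true → pvEdge G a b → out.getD b false = true) :
    ∀ w, pvReach G u0 w → out.getD w false = true := by
  intro w h
  induction h with
  | refl => exact hu
  | tail _hr hedge ih => exact hcl _ _ ih hedge

-- the saturated set pvVisited contains every pvReach-reachable vertex, and under
-- Pre_ every edge out of it lands below G.length
theorem pv_visited_spec (u : Int) (G : List (List Int))
    (hu1 : -(G.length : Int) ≤ u) (hu2 : u < G.length)
    (hok : ∀ a ∈ pvVisited u G, ∀ i ∈ G.getD a [], -(G.length : Int) ≤ i ∧ i < G.length) :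
    ∀ a b, pvReach G (pvNrm G.length u) a → pvEdge G a b → b < G.length := by
  have hu0 : pvNrm G.length u < G.length := pvNrm_lt _ _ hu1 hu2
  have hprog : ∀ S : Finset Nat, S ⊆ pvStepF G S := fun S => Finset.subset_union_left
  have hsucc : ∀ k, (pvStepF G)^[k + 1] {pvNrm G.length u} =
      pvStepF G ((pvStepF G)^[k] {pvNrm G.length u}) := fun k =>
    Function.iterate_succ_apply' (pvStepF G) k _
  have hmono : ∀ j k, j ≤ k →
      (pvStepF G)^[j] {pvNrm G.length u} ⊆ (pvStepF G)^[k] {pvNrm G.length u} := by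
    intro j k hjk
    induction k with
    | zero =>
      rw [Nat.le_zero.mp hjk]
    | succ k ihk =>
      rcases Nat.lt_or_ge j (k + 1) with hx | hx
      · exact (ihk (by omega)).trans (by rw [hsucc]; exact hprog _)
      · rw [Nat.le_antisymm hjk hx]
  have hbnd : ∀ k, (pvStepF G)^[k] {pvNrm G.length u} ⊆ Finset.range G.length := by
    intro k
    induction k with
    | zero =>
      intro x hx
      rw [Function.iterate_zero_apply, Finset.mem_singleton] at hx
      subst hx
      exact Finset.mem_range.mpr hu0
    | succ k ihk =>
      rw [hsucc]
      apply Finset.union_subset ihk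
      intro x hx
      rw [Finset.mem_biUnion] at hx
      obtain ⟨a, -, hx⟩ := hx
      rw [List.mem_toFinset, List.mem_map] at hx
      obtain ⟨i, hi, rfl⟩ := hx
      rw [List.mem_filter] at hi
      have hvi := of_decide_eq_true hi.2
      exact Finset.mem_range.mpr (pvNrm_lt _ _ hvi.1 hvi.2)
  have hstab : ∀ k, pvStepF G ((pvStepF G)^[k] {pvNrm G.length u}) =
      (pvStepF G)^[k] {pvNrm G.length u} →
      ∀ m, (pvStepF G)^[k + m] {pvNrm G.length u} = (pvStepF G)^[k] {pvNrm G.length u} := by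
    intro k hfk m
    induction m with
    | zero => rfl
    | succ m ihm =>
      have : k + (m + 1) = (k + m) + 1 := by omega
      rw [this, hsucc, ihm, hfk]
  have hgrow : ∀ k,
      (∀ j < k, pvStepF G ((pvStepF G)^[j] {pvNrm G.length u}) ≠
        (pvStepF G)^[j] {pvNrm G.length u}) →
      k + 1 ≤ ((pvStepF G)^[k] {pvNrm G.length u}).card := by
    intro k
    induction k with
    | zero =>
      intro _
      simp
    | succ k ihk =>
      intro hall
      have h1 := ihk (fun j hj => hall j (by omega))
      have hss : (pvStepF G)^[k] {pvNrm G.length u} ⊂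
          (pvStepF G)^[k + 1] {pvNrm G.length u} := by
        rw [hsucc]
        exact HasSubset.Subset.ssubset_of_ne (hprog _)
          (fun he => hall k (by omega) he.symm)
      have := Finset.card_lt_card hss
      omega
  have hfix : pvStepF G (pvVisited u G) = pvVisited u G := by
    have hex : ¬ (∀ j < G.length, pvStepF G ((pvStepF G)^[j] {pvNrm G.length u}) ≠
        (pvStepF G)^[j] {pvNrm G.length u}) := by
      intro hall
      have h1 := hgrow G.length hall
      have h2 := Finset.card_le_card (hbnd G.length)
      rw [Finset.card_range] at h2
      omega
    push_neg at hex
    obtain ⟨j, hj, hfj⟩ := hex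
    have he1 : pvVisited u G = (pvStepF G)^[j] {pvNrm G.length u} := by
      have h2 := hstab j hfj (G.length - j)
      have h3 : j + (G.length - j) = G.length := by omega
      rw [h3] at h2
      exact h2
    rw [he1, hfj, ← he1]
  have hclosed : ∀ a ∈ pvVisited u G, ∀ b, pvEdge G a b → b ∈ pvVisited u G ∧ b < G.length := by
    intro a ha b hb
    unfold pvEdge at hb
    obtain ⟨i, hi, rfl⟩ := List.mem_map.mp hb
    have hvi := hok a ha i hi
    constructor
    · rw [← hfix]
      apply Finset.mem_union_right
      rw [Finset.mem_biUnion]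
      refine ⟨a, ha, ?_⟩
      rw [List.mem_toFinset, List.mem_map]
      exact ⟨i, List.mem_filter.mpr ⟨hi, decide_eq_true hvi⟩, rfl⟩
    · exact pvNrm_lt _ _ hvi.1 hvi.2
  have hreach : ∀ a, pvReach G (pvNrm G.length u) a → a ∈ pvVisited u G := by
    intro a ha
    induction ha with
    | refl =>
      exact hmono 0 G.length (Nat.zero_le _) (Finset.mem_singleton_self _)
    | tail _hr hedge ihr =>
      exact (hclosed _ ihr _ hedge).1
  intro a b hra hedge
  exact (hclosed a (hreach a hra) b hedge).2

-- correctness of A's recursive DFS: it marks u, keeps old marks, is sound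
-- (new marks are reachable from u) and complete up to the pending set P
theorem dfsrA_spec (G : List (List Int)) (u0 : Nat)
    (hE : ∀ a b, pvReach G u0 a → pvEdge G a b → b < G.length) :
    ∀ (fuel : Nat) (u : Nat) (vis : List Bool) (P : Nat → Prop),
    pvReach G u0 u →
    vis.length = G.length → u < G.length → vis.getD u false = false →
    vis.count false ≤ fuel →
    (∀ a b, vis.getD a false = true → pvEdge G a b → vis.getD b false = true ∨ P b) →
    (DFSList_dfsr G fuel u vis).length = G.length ∧
    (∀ w, vis.getD w false = true → (DFSList_dfsr G fuel u vis).getD w false = true) ∧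
    (DFSList_dfsr G fuel u vis).count false < vis.count false ∧
    (DFSList_dfsr G fuel u vis).getD u false = true ∧
    (∀ w, (DFSList_dfsr G fuel u vis).getD w false = true → vis.getD w false = true ∨ pvReach G u w) ∧
    (∀ a b, (DFSList_dfsr G fuel u vis).getD a false = true → pvEdge G a b →
      (DFSList_dfsr G fuel u vis).getD b false = true ∨ P b) := by
  intro fuel
  induction fuel with
  | zero =>
    intro u vis P _hru hlen hu hvu hfuel _hcl
    exfalso
    have := pv_cf_set vis u (by omega) hvu
    omega
  | succ fuel ih =>
    intro u vis P hru hlen hu hvu hfuel hcl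
    have hulen : u < vis.length := by omega
    have hstep : DFSList_dfsr G (fuel + 1) u vis =
        (G.getD u []).foldl
          (fun v i =>
            if v.getD (pvNrm G.length i) false then v
            else DFSList_dfsr G fuel (pvNrm G.length i) v)
          (vis.set u true) := by
      simp only [DFSList_dfsr]
      rw [if_pos hulen]
    have hvis1len : (vis.set u true).length = G.length := by simpa using hlen
    have hcnt1 : (vis.set u true).count false + 1 = vis.count false := pv_cf_set vis u hulen hvu
    have hmono1 : ∀ w, vis.getD w false = true → (vis.set u true).getD w false = true := by
      intro w hw
      rw [pv_getD_set _ _ _ hulen]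
      split
      · rfl
      · exact hw
    have hu1 : (vis.set u true).getD u false = true := by
      rw [pv_getD_set _ _ _ hulen]
      simp
    have inner : ∀ (l' : List Int) (v : List Bool),
        (∀ j ∈ l', j ∈ G.getD u []) →
        v.length = G.length →
        (∀ w, (vis.set u true).getD w false = true → v.getD w false = true) →
        v.count false ≤ (vis.set u true).count false →
        (∀ w, v.getD w false = true → (vis.set u true).getD w false = true ∨ pvReach G u w) →
        (∀ a b, v.getD a false = true → pvEdge G a b →
          v.getD b false = true ∨ P b ∨ b ∈ l'.map (pvNrm G.length)) →
        ((l'.foldl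
            (fun v i =>
              if v.getD (pvNrm G.length i) false then v
              else DFSList_dfsr G fuel (pvNrm G.length i) v) v).length = G.length ∧
          (∀ w, v.getD w false = true →
            (l'.foldl
              (fun v i =>
                if v.getD (pvNrm G.length i) false then v
                else DFSList_dfsr G fuel (pvNrm G.length i) v) v).getD w false = true) ∧
          (l'.foldl
            (fun v i =>
              if v.getD (pvNrm G.length i) false then v
              else DFSList_dfsr G fuel (pvNrm G.length i) v) v).count false ≤
            (vis.set u true).count false ∧
          (∀ w,
            (l'.foldl
              (fun v i =>
                if v.getD (pvNrm G.length i) false then v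
                else DFSList_dfsr G fuel (pvNrm G.length i) v) v).getD w false = true →
            (vis.set u true).getD w false = true ∨ pvReach G u w) ∧
          (∀ a b,
            (l'.foldl
              (fun v i =>
                if v.getD (pvNrm G.length i) false then v
                else DFSList_dfsr G fuel (pvNrm G.length i) v) v).getD a false = true →
            pvEdge G a b →
            (l'.foldl
              (fun v i =>
                if v.getD (pvNrm G.length i) false then v
                else DFSList_dfsr G fuel (pvNrm G.length i) v) v).getD b false = true ∨ P b)) := by
      intro l'
      induction l' with
      | nil =>
        intro v _ hlenv hmonov hcntv hsndv hclsv
        simp only [List.foldl_nil]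
        refine ⟨hlenv, fun w hw => hw, hcntv, hsndv, fun a b ha hab => ?_⟩
        rcases hclsv a b ha hab with hx | hx | hx
        · exact Or.inl hx
        · exact Or.inr hx
        · simp at hx
      | cons i t iht =>
        intro v hsub hlenv hmonov hcntv hsndv hclsv
        simp only [List.foldl_cons]
        have hiu : i ∈ G.getD u [] := hsub i (List.mem_cons_self ..)
        have hEuw : pvEdge G u (pvNrm G.length i) := by
          unfold pvEdge
          exact List.mem_map.mpr ⟨i, hiu, rfl⟩
        by_cases hvw : v.getD (pvNrm G.length i) false = true
        · rw [if_pos hvw]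
          apply iht v (fun j hj => hsub j (List.mem_cons_of_mem _ hj)) hlenv hmonov hcntv hsndv
          intro a b ha hab
          rcases hclsv a b ha hab with hx | hx | hx
          · exact Or.inl hx
          · exact Or.inr (Or.inl hx)
          · rw [List.map_cons, List.mem_cons] at hx
            rcases hx with rfl | hx
            · exact Or.inl hvw
            · exact Or.inr (Or.inr hx)
        · rw [if_neg hvw]
          have hwlt : pvNrm G.length i < G.length := hE u _ hru hEuw
          have hrec := ih (pvNrm G.length i) v
            (fun b => P b ∨ b ∈ t.map (pvNrm G.length) ∨ b = pvNrm G.length i)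
            (Relation.ReflTransGen.tail hru hEuw) hlenv hwlt (by simpa using hvw) (by omega)
            (by
              intro a b ha hab
              rcases hclsv a b ha hab with hx | hx | hx
              · exact Or.inl hx
              · exact Or.inr (Or.inl hx)
              · rw [List.map_cons, List.mem_cons] at hx
                rcases hx with rfl | hx
                · exact Or.inr (Or.inr (Or.inr rfl))
                · exact Or.inr (Or.inr (Or.inl hx)))
          obtain ⟨r1, r2, r3, r4, r5, r6⟩ := hrec
          obtain ⟨q1, q2, q3, q4, q5⟩ := iht _ (fun j hj => hsub j (List.mem_cons_of_mem _ hj)) r1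
            (fun w hw => r2 w (hmonov w hw)) (by omega)
            (by
              intro w hw
              rcases r5 w hw with hx | hx
              · exact hsndv w hx
              · exact Or.inr (Relation.ReflTransGen.head hEuw hx))
            (by
              intro a b ha hab
              rcases r6 a b ha hab with hx | hx | hx | hx
              · exact Or.inl hx
              · exact Or.inr (Or.inl hx)
              · exact Or.inr (Or.inr hx)
              · subst hx
                exact Or.inl r4)
          exact ⟨q1, fun w hw => q2 w (r2 w hw), q3, q4, q5⟩
    have hmain := inner (G.getD u []) (vis.set u true) (fun j hj => hj) hvis1len
      (fun w hw => hw) (le_refl _) (fun w hw => Or.inl hw)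
      (by
        intro a b ha hab
        by_cases hau : a = u
        · subst hau
          unfold pvEdge at hab
          exact Or.inr (Or.inr hab)
        · have hva : vis.getD a false = true := by
            rw [pv_getD_set _ _ _ hulen, if_neg (fun hh => hau hh.symm)] at ha
            exact ha
          rcases hcl a b hva hab with hx | hx
          · exact Or.inl (hmono1 b hx)
          · exact Or.inr (Or.inl hx))
    obtain ⟨i1, i2, i3, i4, i5⟩ := hmain
    rw [hstep]
    refine ⟨i1, fun w hw => i2 w (hmono1 w hw), by omega, i2 u hu1, ?_, i5⟩
    intro w hw
    rcases i4 w hw with hx | hx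
    · rw [pv_getD_set _ _ _ hulen] at hx
      by_cases huw : u = w
      · subst huw
        exact Or.inr Relation.ReflTransGen.refl
      · rw [if_neg huw] at hx
        exact Or.inl hx
    · exact Or.inr hx

-- membership in B's neighbour-pushing fold
theorem pv_mem_push {α : Type} (p : α → Bool) :
    ∀ (l acc : List α) (x : α),
    x ∈ l.foldl (fun s i => if p i then s else i :: s) acc ↔
      x ∈ acc ∨ (x ∈ l ∧ p x = false) := by
  intro l
  induction l with
  | nil => simp
  | cons i t ih =>
    intro acc x
    simp only [List.foldl_cons]
    by_cases hp : p i
    · rw [if_pos hp, ih]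
      constructor
      · rintro (h | ⟨h1, h2⟩)
        · exact Or.inl h
        · exact Or.inr ⟨List.mem_cons_of_mem _ h1, h2⟩
      · rintro (h | ⟨h1, h2⟩)
        · exact Or.inl h
        · rcases List.mem_cons.mp h1 with rfl | h1
          · rw [hp] at h2; cases h2
          · exact Or.inr ⟨h1, h2⟩
    · rw [if_neg hp, ih]
      constructor
      · rintro (h | ⟨h1, h2⟩)
        · rcases List.mem_cons.mp h with rfl | h
          · exact Or.inr ⟨List.mem_cons_self .., by simpa using hp⟩
          · exact Or.inl h
        · exact Or.inr ⟨List.mem_cons_of_mem _ h1, h2⟩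
      · rintro (h | ⟨h1, h2⟩)
        · exact Or.inl (List.mem_cons_of_mem _ h)
        · rcases List.mem_cons.mp h1 with rfl | h1
          · exact Or.inl (List.mem_cons_self ..)
          · exact Or.inr ⟨h1, h2⟩

-- correctness of B's stack loop
theorem loopB_spec (G : List (List Int)) (u0 : Nat)
    (hE : ∀ a b, pvReach G u0 a → pvEdge G a b → b < G.length) :
    ∀ (stack : List Int) (vis : List Bool),
    vis.length = G.length →
    (∀ w, vis.getD w false = true → pvReach G u0 w) →
    (∀ i ∈ stack, pvReach G u0 (pvNrm G.length i)) →
    (∀ i ∈ stack, pvNrm G.length i < G.length) →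
    (∀ a b, vis.getD a false = true → pvEdge G a b →
        vis.getD b false = true ∨ ∃ i ∈ stack, pvNrm G.length i = b) →
    (vis.getD u0 false = true ∨ ∃ i ∈ stack, pvNrm G.length i = u0) →
    (DFSList_alt_loop G stack vis).length = G.length ∧
    (∀ w, (DFSList_alt_loop G stack vis).getD w false = true ↔ pvReach G u0 w) := by
  intro stack vis
  induction stack, vis using DFSList_alt_loop.induct (G := G) with
  | case1 vis =>
    intro hlen hsound _hstk _hrange hclosed hu0
    have hred : DFSList_alt_loop G [] vis = vis := by
      simp [DFSList_alt_loop]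
    rw [hred]
    have hu0' : vis.getD u0 false = true := by
      rcases hu0 with h | ⟨i, hi, -⟩
      · exact h
      · simp at hi
    have hcl' : ∀ a b, vis.getD a false = true → pvEdge G a b → vis.getD b false = true := by
      intro a b ha hab
      rcases hclosed a b ha hab with h | ⟨i, hi, -⟩
      · exact h
      · simp at hi
    exact ⟨hlen, fun w =>
      ⟨fun hw => hsound w hw, fun hr => pv_closed_complete G vis u0 hu0' hcl' w hr⟩⟩
  | case2 vis v rest h hv ih =>
    intro hlen hsound hstk hrange hclosed hu0
    have hred : DFSList_alt_loop G (v :: rest) vis = DFSList_alt_loop G rest vis := by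
      conv_lhs => rw [DFSList_alt_loop.eq_def]
      simp only [dif_pos h, dif_pos hv]
    rw [hred]
    apply ih hlen hsound (fun i hi => hstk i (List.mem_cons_of_mem _ hi))
      (fun i hi => hrange i (List.mem_cons_of_mem _ hi))
    · intro a b ha hab
      rcases hclosed a b ha hab with hx | ⟨i, hi, hb⟩
      · exact Or.inl hx
      · rcases List.mem_cons.mp hi with rfl | hi
        · rw [← hb]
          exact Or.inl hv
        · exact Or.inr ⟨i, hi, hb⟩
    · rcases hu0 with hx | ⟨i, hi, hb⟩
      · exact Or.inl hx
      · rcases List.mem_cons.mp hi with rfl | hi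
        · rw [← hb]
          exact Or.inl hv
        · exact Or.inr ⟨i, hi, hb⟩
  | case3 vis v rest h hv ih =>
    intro hlen hsound hstk hrange hclosed hu0
    have hw : pvNrm G.length v < G.length := hrange v (List.mem_cons_self ..)
    have hRv : pvReach G u0 (pvNrm G.length v) := hstk v (List.mem_cons_self ..)
    have hred : DFSList_alt_loop G (v :: rest) vis =
        DFSList_alt_loop G
          ((G.getD (pvNrm G.length v) []).foldl
            (fun s i =>
              if (vis.set (pvNrm G.length v) true).getD (pvNrm G.length i) false then s
              else i :: s)
            rest)
          (vis.set (pvNrm G.length v) true) := by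
      conv_lhs => rw [DFSList_alt_loop.eq_def]
      simp only [dif_pos h, dif_neg hv]
    rw [hred]
    have hmemS : ∀ x : Int,
        x ∈ (G.getD (pvNrm G.length v) []).foldl
            (fun s i =>
              if (vis.set (pvNrm G.length v) true).getD (pvNrm G.length i) false then s
              else i :: s)
            rest ↔
          x ∈ rest ∨ (x ∈ G.getD (pvNrm G.length v) [] ∧
            (vis.set (pvNrm G.length v) true).getD (pvNrm G.length x) false = false) :=
      fun x => pv_mem_push
        (fun i => (vis.set (pvNrm G.length v) true).getD (pvNrm G.length i) false)
        (G.getD (pvNrm G.length v) []) rest x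
    have hmono : ∀ w, vis.getD w false = true →
        (vis.set (pvNrm G.length v) true).getD w false = true := by
      intro w hw'
      rw [pv_getD_set _ _ _ h]
      split
      · rfl
      · exact hw'
    have hvm : (vis.set (pvNrm G.length v) true).getD (pvNrm G.length v) false = true := by
      rw [pv_getD_set _ _ _ h]
      simp
    apply ih (by simpa using hlen)
    · intro w hw'
      rw [pv_getD_set _ _ _ h] at hw'
      by_cases hvw : pvNrm G.length v = w
      · subst hvw
        exact hRv
      · rw [if_neg hvw] at hw'
        exact hsound w hw'
    · intro i hi
      rcases (hmemS i).mp hi with hx | ⟨hx, -⟩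
      · exact hstk i (List.mem_cons_of_mem _ hx)
      · exact Relation.ReflTransGen.tail hRv
          (by unfold pvEdge; exact List.mem_map.mpr ⟨i, hx, rfl⟩)
    · intro i hi
      rcases (hmemS i).mp hi with hx | ⟨hx, -⟩
      · exact hrange i (List.mem_cons_of_mem _ hx)
      · exact hE _ _ hRv (by unfold pvEdge; exact List.mem_map.mpr ⟨i, hx, rfl⟩)
    · intro a b ha hab
      rw [pv_getD_set _ _ _ h] at ha
      by_cases hva : pvNrm G.length v = a
      · subst hva
        by_cases hb : (vis.set (pvNrm G.length v) true).getD b false = true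
        · exact Or.inl hb
        · obtain ⟨i, hi, rfl⟩ := List.mem_map.mp hab
          refine Or.inr ⟨i, (hmemS i).mpr (Or.inr ⟨hi, ?_⟩), rfl⟩
          simpa using hb
      · rw [if_neg hva] at ha
        rcases hclosed a b ha hab with hx | ⟨i, hi, hb⟩
        · exact Or.inl (hmono b hx)
        · rcases List.mem_cons.mp hi with rfl | hi
          · rw [← hb]
            exact Or.inl hvm
          · exact Or.inr ⟨i, (hmemS i).mpr (Or.inl hi), hb⟩
    · rcases hu0 with hx | ⟨i, hi, hb⟩
      · exact Or.inl (hmono u0 hx)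
      · rcases List.mem_cons.mp hi with rfl | hi
        · rw [← hb]
          exact Or.inl hvm
        · exact Or.inr ⟨i, (hmemS i).mpr (Or.inl hi), hb⟩
  | case4 vis v rest h =>
    intro hlen _hsound _hstk hrange _hclosed _hu0
    exact absurd (by rw [hlen]; exact hrange v (List.mem_cons_self ..)) h

-- ===== VERDICT (by name: the statement is the Claim_ definition above) =====
theorem DFSList_spec : Claim_equal_DFSList := by
  unfold Claim_equal_DFSList Spec_DFSList
  intro u G _hDom hPre
  obtain ⟨⟨hu1, hu2⟩, hGr⟩ := hPre
  have hE : ∀ a b, pvReach G (pvNrm G.length u) a → pvEdge G a b → b < G.length :=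
    pv_visited_spec u G hu1 hu2 hGr
  have hu0 : pvNrm G.length u < G.length := pvNrm_lt _ _ hu1 hu2
  have hA := dfsrA_spec G (pvNrm G.length u) hE G.length (pvNrm G.length u)
    (List.replicate G.length false)
    (fun _ => False) Relation.ReflTransGen.refl (by simp) hu0 (pv_getD_replicate _ _)
    (by simp)
    (by
      intro a b ha _
      rw [pv_getD_replicate] at ha
      cases ha)
  obtain ⟨aLen, -, -, aU, aSnd, aCls⟩ := hA
  have hB := loopB_spec G (pvNrm G.length u) hE [u] (List.replicate G.length false)
    (by simp)
    (by
      intro w hw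
      rw [pv_getD_replicate] at hw
      cases hw)
    (by
      intro i hi
      rcases List.mem_cons.mp hi with rfl | hi
      · exact Relation.ReflTransGen.refl
      · cases hi)
    (by
      intro i hi
      rcases List.mem_cons.mp hi with rfl | hi
      · exact hu0
      · cases hi)
    (by
      intro a b ha _
      rw [pv_getD_replicate] at ha
      cases ha)
    (Or.inr ⟨u, List.mem_cons_self .., rfl⟩)
  obtain ⟨bLen, bIff⟩ := hB
  have aIff : ∀ w,
      (DFSList_dfsr G G.length (pvNrm G.length u) (List.replicate G.length false)).getD w false = true ↔
        pvReach G (pvNrm G.length u) w := by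
    intro w
    constructor
    · intro hw
      rcases aSnd w hw with hx | hx
      · rw [pv_getD_replicate] at hx
        cases hx
      · exact hx
    · exact pv_closed_complete G _ _ aU
        (fun a b ha hab => (aCls a b ha hab).resolve_right (fun f => f.elim)) w
  show DFSList_dfsr G G.length (pvNrm G.length u) (List.replicate G.length false) =
    DFSList_alt_loop G [u] (List.replicate G.length false)
  apply List.ext_getElem (by rw [aLen, bLen])
  intro i h1 h2
  have e1 := List.getD_eq_getElem
    (DFSList_dfsr G G.length (pvNrm G.length u) (List.replicate G.length false)) false h1
  have e2 := List.getD_eq_getElem (DFSList_alt_loop G [u] (List.replicate G.length false)) false h2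
  have hiff := (aIff i).trans (bIff i).symm
  rw [e1, e2] at hiff
  cases hx : (DFSList_dfsr G G.length (pvNrm G.length u) (List.replicate G.length false))[i] <;>
    cases hy : (DFSList_alt_loop G [u] (List.replicate G.length false))[i]
  · rfl
  · rw [hx, hy] at hiff
    simpa using hiff
  · rw [hx, hy] at hiff
    simpa using hiff
  · rfl
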